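-- pv_equiv track=rewrite | github.com/lindycoder/AdventOfCode | y2020/day13.py | matching_interval
-- ===== SOURCE A (Python) =====
-- from itertools import count
--
-- def matching_interval(start_at, interval, time_diff, next_bus_index):
--     first_match = None
--
--     for i in count(1):
--         timestamp = interval * i + start_at
--
--         if (timestamp + time_diff) % next_bus_index == 0:
--             if first_match is None:
--                 first_match = timestamp
--             else:
--                 return first_match, timestamp - first_match
-- ===== SOURCE B (Python) =====
-- def _egcd(a, b):
--     # extended Euclid: (g, x, y) with a*x + b*y = g; g = gcd(a, b) when b > 0
--     if b == 0:
--         return a, 1, 0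
--     g, x, y = _egcd(b, a % b)
--     return g, y, x - (a // b) * y
--
--
-- def matching_interval(start_at, interval, time_diff, next_bus_index):
--     n = abs(next_bus_index)
--     c = -(start_at + time_diff)
--     g, x, _y = _egcd(interval, n)
--     m = n // g
--     i0 = ((c // g) * x) % m
--     i = i0 if i0 >= 1 else i0 + m
--     return interval * i + start_at, interval * m
-- ===== Notes on version B (the rewrite author's own statement) =====
-- stated objective: faster
-- what changed: Replaces A's unbounded linear scan over i=1,2,... looking for two timestamps satisfying the congruence by solving the linear congruence interval*i = -(start_at+time_diff) (mod |next_bus_index|) directly with extended Euclid, taking the least positive solution as the first match and n/gcd(interval,n) as the period.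
import Mathlib
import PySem

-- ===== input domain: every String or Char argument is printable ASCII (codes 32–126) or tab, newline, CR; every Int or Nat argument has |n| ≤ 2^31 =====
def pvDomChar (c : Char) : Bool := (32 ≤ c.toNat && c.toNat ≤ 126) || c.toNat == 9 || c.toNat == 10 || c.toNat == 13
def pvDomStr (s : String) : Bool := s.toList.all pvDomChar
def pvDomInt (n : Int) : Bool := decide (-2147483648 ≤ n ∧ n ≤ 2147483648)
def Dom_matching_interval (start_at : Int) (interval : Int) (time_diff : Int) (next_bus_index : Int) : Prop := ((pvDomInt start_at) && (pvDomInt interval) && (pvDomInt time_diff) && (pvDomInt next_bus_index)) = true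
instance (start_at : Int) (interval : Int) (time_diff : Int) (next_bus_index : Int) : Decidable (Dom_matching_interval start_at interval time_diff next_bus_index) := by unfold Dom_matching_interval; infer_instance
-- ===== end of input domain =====

-- B replaces A's unbounded linear scan for the two matching timestamps by solving the
-- linear congruence directly with extended Euclid (objective: faster, asymptotically).

-- ===== PORT A =====
-- A's `for i in count(1)` loop; the fuel argument only makes the unbounded Python loop
-- total (on Pre_ the loop returns before the fuel runs out; proved below).
def matchingLoopA (start_at : Int) (interval : Int) (time_diff : Int)
    (next_bus_index : Int) : Nat → Int → Option Int → List Int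
  | 0, _, _ => []
  | fuel + 1, i, first_match =>
    let timestamp := interval * i + start_at
    if PySem.Int.mod (timestamp + time_diff) next_bus_index = 0 then
      match first_match with
      | none => matchingLoopA start_at interval time_diff next_bus_index fuel (i + 1) (some timestamp)
      | some f => [f, timestamp - f]
    else
      matchingLoopA start_at interval time_diff next_bus_index fuel (i + 1) first_match

def matching_interval (start_at : Int) (interval : Int) (time_diff : Int) (next_bus_index : Int) : List Int :=
  matchingLoopA start_at interval time_diff next_bus_index (2 * next_bus_index.natAbs + 2) 1 none

-- ===== PORT B =====
-- termination fact for egcdB (Source B's _egcd recursion terminates because |a % b| < |b|);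
-- cited by the port's decreasing_by
theorem pv_mod_natAbs_lt (a b : Int) (hb : ¬ b = 0) : (PySem.Int.mod a b).natAbs < b.natAbs := by
  rcases lt_or_gt_of_ne hb with h | h
  · have h1 := PySem.Int.mod_neg_bounds a h
    omega
  · have h1 := PySem.Int.mod_nonneg a h
    have h2 := PySem.Int.mod_lt a h
    omega

-- port of Source B's _egcd
def egcdB (a b : Int) : Int × Int × Int :=
  if hb : b = 0 then (a, 1, 0)
  else
    let r := egcdB b (PySem.Int.mod a b)
    (r.1, r.2.2, r.2.1 - PySem.Int.floordiv a b * r.2.2)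
termination_by b.natAbs
decreasing_by exact pv_mod_natAbs_lt a b hb

def matching_interval_alt (start_at : Int) (interval : Int) (time_diff : Int) (next_bus_index : Int) : List Int :=
  let n : Int := |next_bus_index|
  let c : Int := -(start_at + time_diff)
  let r := egcdB interval n
  let g := r.1
  let x := r.2.1
  let m := PySem.Int.floordiv n g
  let i0 := PySem.Int.mod (PySem.Int.floordiv c g * x) m
  let i := if 1 ≤ i0 then i0 else i0 + m
  [interval * i + start_at, interval * m]

-- ===== PRECONDITION & SPEC =====
-- Pre_ excludes exactly the inputs on which Python A does not return: next_bus_index = 0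
-- (ZeroDivisionError) and the unsolvable congruences gcd(interval, next_bus_index) ∤
-- (start_at + time_diff), on which A's loop never finds a match and runs forever.
def Pre_matching_interval (start_at : Int) (interval : Int) (time_diff : Int) (next_bus_index : Int) : Prop :=
  next_bus_index ≠ 0 ∧ (Int.gcd interval next_bus_index : Int) ∣ (start_at + time_diff)
instance (start_at : Int) (interval : Int) (time_diff : Int) (next_bus_index : Int) : Decidable (Pre_matching_interval start_at interval time_diff next_bus_index) := by unfold Pre_matching_interval; infer_instance

def pvWitness_matching_interval : Int × Int × Int × Int := (0, 3, 1, 7)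

def Spec_matching_interval (start_at : Int) (interval : Int) (time_diff : Int) (next_bus_index : Int) (out : List Int) : Prop := out = matching_interval_alt start_at interval time_diff next_bus_index
instance (start_at : Int) (interval : Int) (time_diff : Int) (next_bus_index : Int) (out : List Int) : Decidable (Spec_matching_interval start_at interval time_diff next_bus_index out) := by unfold Spec_matching_interval; infer_instance

-- ===== CLAIM (what is proved, stated in full; the proofs are below) =====
def Claim_equal_matching_interval : Prop := ∀ (start_at : Int) (interval : Int) (time_diff : Int) (next_bus_index : Int), Dom_matching_interval start_at interval time_diff next_bus_index → Pre_matching_interval start_at interval time_diff next_bus_index → Spec_matching_interval start_at interval time_diff next_bus_index (matching_interval start_at interval time_diff next_bus_index)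

-- ===== LEMMAS AND PROOFS =====

theorem pv_gcd_emod (a b : Int) : Int.gcd b (a % b) = Int.gcd a b := by
  have h1 : (↑(Int.gcd b (a % b)) : Int) ∣ b := Int.gcd_dvd_left _ _
  have h2 : (↑(Int.gcd b (a % b)) : Int) ∣ a % b := Int.gcd_dvd_right _ _
  have h3 : (↑(Int.gcd a b) : Int) ∣ a := Int.gcd_dvd_left _ _
  have h4 : (↑(Int.gcd a b) : Int) ∣ b := Int.gcd_dvd_right _ _
  have h5 : (↑(Int.gcd b (a % b)) : Int) ∣ a := by
    have h0 := dvd_add (h1.mul_right (a / b)) h2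
    rwa [Int.mul_ediv_add_emod] at h0
  have h6 : (↑(Int.gcd a b) : Int) ∣ a % b := by
    rw [Int.emod_def]; exact dvd_sub h3 (h4.mul_right _)
  exact Nat.dvd_antisymm (Int.dvd_gcd h5 h1) (Int.dvd_gcd h4 h6)

theorem egcdB_correct : ∀ (k : Nat) (a b : Int), b.natAbs ≤ k → 0 ≤ b → (b = 0 → 0 ≤ a) →
    (egcdB a b).1 = (Int.gcd a b : Int) ∧
    a * (egcdB a b).2.1 + b * (egcdB a b).2.2 = (egcdB a b).1 := by
  intro k
  induction k with
  | zero =>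
    intro a b hk hb0 ha
    have hb : b = 0 := by omega
    subst hb
    have ha' : 0 ≤ a := ha rfl
    rw [egcdB]
    simp [Int.gcd, Int.natAbs_of_nonneg ha']
  | succ k ih =>
    intro a b hk hb0 ha
    by_cases hb : b = 0
    · subst hb
      have ha' : 0 ≤ a := ha rfl
      rw [egcdB]
      simp [Int.gcd, Int.natAbs_of_nonneg ha']
    · have hbpos : 0 < b := lt_of_le_of_ne hb0 (Ne.symm hb)
      have hmod : PySem.Int.mod a b = a % b := PySem.Int.mod_eq_emod_of_pos hbpos
      have hdiv : PySem.Int.floordiv a b = a / b := PySem.Int.floordiv_eq_ediv_of_pos hbpos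
      obtain ⟨hg, hbez⟩ := ih b (PySem.Int.mod a b)
        (by have := Int.emod_nonneg a hb; have := Int.emod_lt_of_pos a hbpos; rw [hmod]; omega)
        (by rw [hmod]; exact Int.emod_nonneg a hb) (fun _ => le_of_lt hbpos)
      rw [egcdB]
      simp only [dif_neg hb]
      set r := egcdB b (PySem.Int.mod a b) with hr
      rw [hmod] at hbez hg
      constructor
      · rw [hg, pv_gcd_emod]
      · rw [hdiv]
        rw [Int.emod_def] at hbez
        linear_combination hbez

theorem loopA_phase2 (s v t b iB m F : Int) (hF : F = v * iB + s)
    (hdvd2 : b ∣ (v * (iB + m) + s + t))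
    (hnd : ∀ j : Int, iB < j → j < iB + m → ¬ b ∣ (v * j + s + t)) :
    ∀ (fuel : Nat) (i : Int), iB < i → i ≤ iB + m → (iB + m - i).toNat < fuel →
    matchingLoopA s v t b fuel i (some F) = [F, v * m] := by
  intro fuel
  induction fuel with
  | zero => intro i h1 h2 h3; omega
  | succ fu ih =>
    intro i h1 h2 h3
    by_cases hi : i = iB + m
    · subst hi
      have hc : PySem.Int.mod (v * (iB + m) + s + t) b = 0 :=
        (PySem.Int.mod_eq_zero_iff_dvd _ _).mpr hdvd2
      simp only [matchingLoopA, hc, if_pos]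
      simp only [List.cons.injEq, and_true, true_and]
      rw [hF]; ring
    · have hlt : i < iB + m := lt_of_le_of_ne h2 hi
      have hc : ¬ PySem.Int.mod (v * i + s + t) b = 0 := fun h =>
        hnd i h1 hlt ((PySem.Int.mod_eq_zero_iff_dvd _ _).mp h)
      simp only [matchingLoopA, hc, if_false]
      exact ih (i + 1) (by omega) (by omega) (by omega)

theorem loopA_phase1 (s v t b iB m : Int) (hm : 1 ≤ m)
    (hdvd1 : b ∣ (v * iB + s + t))
    (hdvd2 : b ∣ (v * (iB + m) + s + t))
    (hnd : ∀ j : Int, iB < j → j < iB + m → ¬ b ∣ (v * j + s + t))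
    (hnd1 : ∀ j : Int, 1 ≤ j → j < iB → ¬ b ∣ (v * j + s + t)) :
    ∀ (fuel : Nat) (i : Int), 1 ≤ i → i ≤ iB → (iB + m + 1 - i).toNat < fuel →
    matchingLoopA s v t b fuel i none = [v * iB + s, v * m] := by
  intro fuel
  induction fuel with
  | zero => intro i h1 h2 h3; omega
  | succ fu ih =>
    intro i h1 h2 h3
    by_cases hi : i = iB
    · have hc : PySem.Int.mod (v * i + s + t) b = 0 := by
        rw [hi]; exact (PySem.Int.mod_eq_zero_iff_dvd _ _).mpr hdvd1
      simp only [matchingLoopA, hc, if_pos]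
      rw [hi]
      exact loopA_phase2 s v t b iB m (v * iB + s) rfl hdvd2 hnd fu (iB + 1)
        (by omega) (by omega) (by omega)
    · have hlt : i < iB := lt_of_le_of_ne h2 hi
      have hc : ¬ PySem.Int.mod (v * i + s + t) b = 0 := fun h =>
        hnd1 i h1 hlt ((PySem.Int.mod_eq_zero_iff_dvd _ _).mp h)
      simp only [matchingLoopA, hc, if_false]
      exact ih (i + 1) (by omega) (by omega) (by omega)

theorem matching_interval_spec' (s v t b : Int) (hb : b ≠ 0)
    (hd : (Int.gcd v b : Int) ∣ (s + t)) :
    matching_interval s v t b = matching_interval_alt s v t b := by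
  simp only [matching_interval, matching_interval_alt]
  set n : Int := |b| with hn0
  have hnpos : 0 < n := abs_pos.mpr hb
  have hnabs : n = (b.natAbs : Int) := Int.abs_eq_natAbs b
  obtain ⟨hg, hbez⟩ := egcdB_correct n.natAbs v n le_rfl (le_of_lt hnpos)
    (fun h => absurd h (ne_of_gt hnpos))
  set r := egcdB v n with hr0
  set g := r.1 with hg0
  set x := r.2.1 with hx0
  set y := r.2.2 with hy0
  -- gcd over n = |b| equals gcd over b
  have hgcdn : Int.gcd v n = Int.gcd v b := by
    rw [Int.gcd_def, Int.gcd_def, hn0]; simp [Int.natAbs_abs]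
  have hgpos : 0 < g := by
    have h1 : Int.gcd v b ≠ 0 := fun h => hb (Int.gcd_eq_zero_iff.mp h).2
    have h2 : (0 : Int) < (Int.gcd v b : Int) := by exact_mod_cast Nat.pos_of_ne_zero h1
    rw [hg, hgcdn]; exact h2
  have hgv : g ∣ v := by rw [hg]; exact Int.gcd_dvd_left _ _
  have hgn : g ∣ n := by rw [hg]; exact Int.gcd_dvd_right _ _
  set m := PySem.Int.floordiv n g with hm0
  have hm : m = n / g := PySem.Int.floordiv_eq_ediv_of_pos hgpos
  have hgm : g * m = n := by rw [hm]; exact Int.mul_ediv_cancel' hgn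
  have hmpos : 0 < m := by nlinarith
  have hmn : m ≤ n := by nlinarith
  have hgc : g ∣ -(s + t) := by rw [hg, hgcdn]; exact (Int.dvd_neg).mpr hd
  set c' := PySem.Int.floordiv (-(s + t)) g with hc0
  have hc' : g * c' = -(s + t) := by
    rw [hc0, PySem.Int.floordiv_eq_ediv_of_pos hgpos]
    exact Int.mul_ediv_cancel' hgc
  set v' := v / g with hv0
  have hv' : g * v' = v := Int.mul_ediv_cancel' hgv
  set i0 := PySem.Int.mod (c' * x) m with hi00
  have hi0a : 0 ≤ i0 := PySem.Int.mod_nonneg _ hmpos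
  have hi0b : i0 < m := PySem.Int.mod_lt _ hmpos
  have hi0e : i0 = c' * x - m * ((c' * x) / m) := by
    rw [hi00, PySem.Int.mod_eq_emod_of_pos hmpos, Int.emod_def]
  set iB := if 1 ≤ i0 then i0 else i0 + m with hiB0
  have hiB1 : 1 ≤ iB := by rw [hiB0]; split <;> omega
  have hiB2 : iB ≤ m := by rw [hiB0]; split <;> omega
  -- iB = c' * x + m * K
  obtain ⟨K, hK⟩ : ∃ K : Int, iB = c' * x + m * K := by
    rw [hiB0]; split
    · exact ⟨-((c' * x) / m), by rw [hi0e]; ring⟩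
    · exact ⟨1 - (c' * x) / m, by rw [hi0e]; ring⟩
  -- the key divisibility: n ∣ v * iB + (s + t)
  have K1 : n ∣ v * iB + (s + t) := by
    refine ⟨v' * K - c' * y, ?_⟩
    linear_combination v * hK + c' * hbez + hc' - (m * K) * hv' + (v' * K) * hgm
  have K1b : b ∣ v * iB + s + t := by
    have h2 : v * iB + s + t = v * iB + (s + t) := by ring
    rw [h2, ← abs_dvd]
    exact K1
  -- uniqueness: any solution is congruent to iB mod m
  have K2 : ∀ j : Int, b ∣ v * j + s + t → m ∣ (j - iB) := by
    intro j hj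
    have hnj : n ∣ v * j + s + t := by rw [hn0]; exact (abs_dvd b _).mpr hj
    have K1n : n ∣ v * iB + s + t := by
      have h2 : v * iB + s + t = v * iB + (s + t) := by ring
      rw [h2]; exact K1
    have hdiff : n ∣ v * (j - iB) := by
      have := dvd_sub hnj K1n
      have h2 : v * j + s + t - (v * iB + s + t) = v * (j - iB) := by ring
      rwa [h2] at this
    have hgv'm : m ∣ v' * (j - iB) := by
      rcases hdiff with ⟨w, hw⟩
      refine ⟨w, ?_⟩
      have hgne : g ≠ 0 := ne_of_gt hgpos
      apply mul_left_cancel₀ hgne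
      calc g * (v' * (j - iB)) = (g * v') * (j - iB) := by ring
        _ = v * (j - iB) := by rw [hv']
        _ = n * w := hw
        _ = (g * m) * w := by rw [hgm]
        _ = g * (m * w) := by ring
    have hcop : Int.gcd m v' = 1 := by
      have hpos : 0 < Int.gcd v n := by
        have h0 : (0 : Int) < (Int.gcd v n : Int) := by rw [← hg]; exact hgpos
        exact_mod_cast h0
      have h := Int.gcd_div_gcd_div_gcd hpos
      rw [hm, hv0, hg]
      rw [Int.gcd_comm]
      exact h
    exact Int.dvd_of_dvd_mul_right_of_gcd_one hgv'm hcop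
  -- loop hypotheses
  have hdvd2 : b ∣ v * (iB + m) + s + t := by
    have hvm : b ∣ v * m := by
      rw [← abs_dvd, ← hn0]
      exact ⟨v', by linear_combination (-m) * hv' + v' * hgm⟩
    have := dvd_add K1b hvm
    have h2 : v * iB + s + t + v * m = v * (iB + m) + s + t := by ring
    rwa [h2] at this
  have hnd : ∀ j : Int, iB < j → j < iB + m → ¬ b ∣ (v * j + s + t) := by
    intro j hj1 hj2 hdv
    have h := K2 j hdv
    have := Int.le_of_dvd (by omega) h
    omega
  have hnd1 : ∀ j : Int, 1 ≤ j → j < iB → ¬ b ∣ (v * j + s + t) := by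
    intro j hj1 hj2 hdv
    have h := K2 j hdv
    have h2 : m ∣ (iB - j) := by
      have h3 := dvd_neg.mpr h
      rwa [neg_sub] at h3
    have := Int.le_of_dvd (by omega) h2
    omega
  rw [loopA_phase1 s v t b iB m hmpos K1b hdvd2 hnd hnd1 (2 * b.natAbs + 2) 1
    (le_refl 1) hiB1 (by omega)]

-- ===== VERDICT (by name: the statement is the Claim_ definition above) =====
theorem matching_interval_spec : Claim_equal_matching_interval := by
  intro s v t b _ hpre
  exact matching_interval_spec' s v t b hpre.1 hpre.2
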